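-- pv_equiv track=rewrite | github.com/Yan-99/PharmCalc | project/project.py | cal_BP_points_F
-- ===== SOURCE A (Python) =====
-- def cal_BP_points_F(BP, BP_tx):
--     BP_points = 0
--     BP_tx = BP_tx.upper()
--     if BP_tx == "N":
--         BP_dict_untreated = {(120,129):1,(130,139):2,(140,159):3}
--         for (start, end), value in BP_dict_untreated.items():
--             if start <= BP <= end:
--                 BP_points = value
--             if BP < 120:
--                 BP_points = 0
--             if BP >= 160:
--                 BP_points = 4
--         return BP_points
--
--     else:
--         BP_dict_treated = {(120,129):3,(130,139):4,(140,159):5}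
--
--         for (start, end), value in BP_dict_treated.items():
--             if start <= BP <= end:
--                 BP_points = value
--             if BP < 120:
--                 BP_points = 0
--             if BP >= 160:
--                 BP_points = 6
--         return BP_points
-- ===== SOURCE B (Python) =====
-- def cal_BP_points_F(BP, BP_tx):
--     if BP_tx.upper() == "N":
--         if BP < 120:
--             return 0
--         elif BP <= 129:
--             return 1
--         elif BP <= 139:
--             return 2
--         elif BP <= 159:
--             return 3
--         else:
--             return 4
--     else:
--         if BP < 120:
--             return 0
--         elif BP <= 129:
--             return 3
--         elif BP <= 139:
--             return 4
--         elif BP <= 159: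
--             return 5
--         else:
--             return 6
-- ===== Notes on version B (the rewrite author's own statement) =====
-- stated objective: simpler
-- what changed: Replaced the dict-of-ranges plus loop with repeated overwrite checks by a direct if/elif classification chain returning the points immediately.
import Mathlib
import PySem

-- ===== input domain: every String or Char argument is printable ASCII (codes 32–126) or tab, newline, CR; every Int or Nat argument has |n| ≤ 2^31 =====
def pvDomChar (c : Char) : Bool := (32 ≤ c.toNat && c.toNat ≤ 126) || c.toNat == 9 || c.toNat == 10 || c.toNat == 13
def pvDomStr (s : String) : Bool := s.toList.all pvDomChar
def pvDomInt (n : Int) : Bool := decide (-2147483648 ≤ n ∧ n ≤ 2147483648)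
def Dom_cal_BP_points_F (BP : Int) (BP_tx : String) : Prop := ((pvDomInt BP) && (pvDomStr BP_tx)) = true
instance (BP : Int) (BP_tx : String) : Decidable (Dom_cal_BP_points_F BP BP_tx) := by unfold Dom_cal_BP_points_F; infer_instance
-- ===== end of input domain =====

-- ===== PORT A =====
-- B replaces A's dict+loop with a direct if/elif chain (objective: simpler).
def cal_BP_points_F (BP : Int) (BP_tx : String) : Int :=
  let BP_points : Int := 0
  let BP_tx := PySem.Str.upper BP_tx
  if BP_tx == "N" then
    let BP_dict_untreated : List ((Int × Int) × Int) := [((120,129),1),((130,139),2),((140,159),3)]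
    BP_dict_untreated.foldl (fun BP_points p =>
      let BP_points := if p.1.1 ≤ BP ∧ BP ≤ p.1.2 then p.2 else BP_points
      let BP_points := if BP < 120 then 0 else BP_points
      if BP ≥ 160 then 4 else BP_points) BP_points
  else
    let BP_dict_treated : List ((Int × Int) × Int) := [((120,129),3),((130,139),4),((140,159),5)]
    BP_dict_treated.foldl (fun BP_points p =>
      let BP_points := if p.1.1 ≤ BP ∧ BP ≤ p.1.2 then p.2 else BP_points
      let BP_points := if BP < 120 then 0 else BP_points
      if BP ≥ 160 then 6 else BP_points) BP_points

-- ===== PORT B =====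
def cal_BP_points_F_alt (BP : Int) (BP_tx : String) : Int :=
  if PySem.Str.upper BP_tx == "N" then
    if BP < 120 then 0
    else if BP ≤ 129 then 1
    else if BP ≤ 139 then 2
    else if BP ≤ 159 then 3
    else 4
  else
    if BP < 120 then 0
    else if BP ≤ 129 then 3
    else if BP ≤ 139 then 4
    else if BP ≤ 159 then 5
    else 6

-- ===== PRECONDITION & SPEC =====
def Spec_cal_BP_points_F (BP : Int) (BP_tx : String) (out : Int) : Prop := out = cal_BP_points_F_alt BP BP_tx
instance (BP : Int) (BP_tx : String) (out : Int) : Decidable (Spec_cal_BP_points_F BP BP_tx out) := by unfold Spec_cal_BP_points_F; infer_instance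

-- ===== CLAIM (what is proved, stated in full; the proofs are below) =====
def Claim_equal_cal_BP_points_F : Prop := ∀ (BP : Int) (BP_tx : String), Dom_cal_BP_points_F BP BP_tx → Spec_cal_BP_points_F BP BP_tx (cal_BP_points_F BP BP_tx)

-- ===== LEMMAS AND PROOFS =====

-- ===== VERDICT (by name: the statement is the Claim_ definition above) =====
theorem cal_BP_points_F_spec : Claim_equal_cal_BP_points_F := by
  intro BP BP_tx _
  unfold Spec_cal_BP_points_F cal_BP_points_F cal_BP_points_F_alt
  by_cases h : PySem.Str.upper BP_tx == "N" <;>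
    simp only [h, if_true, List.foldl] <;> split_ifs <;> omega
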